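-- pv_equiv track=rewrite | github.com/YenAle-FT-Gmail/Japan101 | backend/app/routers/zenkaku.py | romaji_to_katakana
-- ===== SOURCE A (Python) =====
-- _HW_TO_FW_OFFSET = 0xFEE0  # U+FF01 - U+0021 = 0xFEE0
--
-- def ascii_to_fullwidth(text: str) -> str:
--     """Convert ASCII (0x21-0x7E) characters to their full-width equivalents."""
--     result = []
--     for ch in text:
--         cp = ord(ch)
--         if 0x21 <= cp <= 0x7E:
--             result.append(chr(cp + _HW_TO_FW_OFFSET))
--         elif ch == " ":
--             result.append("\u3000")  # full-width space
--         else: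
--             result.append(ch)
--     return "".join(result)
--
-- def romaji_to_katakana(text: str) -> str:
--     """Basic romaji → katakana conversion for common name patterns."""
--     _MAP = {
--         "a": "ア", "i": "イ", "u": "ウ", "e": "エ", "o": "オ",
--         "ka": "カ", "ki": "キ", "ku": "ク", "ke": "ケ", "ko": "コ",
--         "sa": "サ", "shi": "シ", "si": "シ", "su": "ス", "se": "セ", "so": "ソ",
--         "ta": "タ", "chi": "チ", "ti": "チ", "tsu": "ツ", "tu": "ツ", "te": "テ", "to": "ト",
--         "na": "ナ", "ni": "ニ", "nu": "ヌ", "ne": "ネ", "no": "ノ",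
--         "ha": "ハ", "hi": "ヒ", "fu": "フ", "hu": "フ", "he": "ヘ", "ho": "ホ",
--         "ma": "マ", "mi": "ミ", "mu": "ム", "me": "メ", "mo": "モ",
--         "ya": "ヤ", "yu": "ユ", "yo": "ヨ",
--         "ra": "ラ", "ri": "リ", "ru": "ル", "re": "レ", "ro": "ロ",
--         "wa": "ワ", "wi": "ヰ", "we": "ヱ", "wo": "ヲ",
--         "n": "ン",
--         "ga": "ガ", "gi": "ギ", "gu": "グ", "ge": "ゲ", "go": "ゴ",
--         "za": "ザ", "ji": "ジ", "zi": "ジ", "zu": "ズ", "ze": "ゼ", "zo": "ゾ",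
--         "da": "ダ", "di": "ヂ", "du": "ヅ", "de": "デ", "do": "ド",
--         "ba": "バ", "bi": "ビ", "bu": "ブ", "be": "ベ", "bo": "ボ",
--         "pa": "パ", "pi": "ピ", "pu": "プ", "pe": "ペ", "po": "ポ",
--         "kya": "キャ", "kyu": "キュ", "kyo": "キョ",
--         "sha": "シャ", "shu": "シュ", "sho": "ショ",
--         "cha": "チャ", "chu": "チュ", "cho": "チョ",
--         "nya": "ニャ", "nyu": "ニュ", "nyo": "ニョ",
--         "hya": "ヒャ", "hyu": "ヒュ", "hyo": "ヒョ",
--         "mya": "ミャ", "myu": "ミュ", "myo": "ミョ",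
--         "rya": "リャ", "ryu": "リュ", "ryo": "リョ",
--         "gya": "ギャ", "gyu": "ギュ", "gyo": "ギョ",
--         "ja": "ジャ", "ju": "ジュ", "jo": "ジョ",
--         "bya": "ビャ", "byu": "ビュ", "byo": "ビョ",
--         "pya": "ピャ", "pyu": "ピュ", "pyo": "ピョ",
--     }
--     text_lower = text.lower()
--     result = []
--     i = 0
--     while i < len(text_lower):
--         # Try 3-char, 2-char, 1-char matches
--         matched = False
--         for length in (3, 2, 1):
--             chunk = text_lower[i:i + length]
--             if chunk in _MAP:
--                 result.append(_MAP[chunk])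
--                 i += length
--                 matched = True
--                 break
--         if not matched:
--             ch = text_lower[i]
--             if ch == " ":
--                 result.append("・")
--             elif ch == "-":
--                 result.append("ー")
--             else:
--                 result.append(ascii_to_fullwidth(ch.upper()))
--             i += 1
--     return "".join(result)
-- ===== SOURCE B (Python) =====
-- # Alternative: the table lives in compact "key:kana" entry strings; conversion
-- # walks an index taking the first match from a longest-first
-- # key list (regex-alternation style) instead of A's indexed 3/2/1-char slice lookups.
-- _HW_TO_FW_OFFSET = 0xFEE0
--
-- _ENTRIES = [
--     "a:ア", "i:イ", "u:ウ", "e:エ", "o:オ", "ka:カ", "ki:キ", "ku:ク", "ke:ケ", "ko:コ",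
--     "sa:サ", "shi:シ", "si:シ", "su:ス", "se:セ", "so:ソ", "ta:タ", "chi:チ", "ti:チ", "tsu:ツ",
--     "tu:ツ", "te:テ", "to:ト", "na:ナ", "ni:ニ", "nu:ヌ", "ne:ネ", "no:ノ", "ha:ハ", "hi:ヒ",
--     "fu:フ", "hu:フ", "he:ヘ", "ho:ホ", "ma:マ", "mi:ミ", "mu:ム", "me:メ", "mo:モ", "ya:ヤ",
--     "yu:ユ", "yo:ヨ", "ra:ラ", "ri:リ", "ru:ル", "re:レ", "ro:ロ", "wa:ワ", "wi:ヰ", "we:ヱ",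
--     "wo:ヲ", "n:ン", "ga:ガ", "gi:ギ", "gu:グ", "ge:ゲ", "go:ゴ", "za:ザ", "ji:ジ", "zi:ジ",
--     "zu:ズ", "ze:ゼ", "zo:ゾ", "da:ダ", "di:ヂ", "du:ヅ", "de:デ", "do:ド", "ba:バ", "bi:ビ",
--     "bu:ブ", "be:ベ", "bo:ボ", "pa:パ", "pi:ピ", "pu:プ", "pe:ペ", "po:ポ", "kya:キャ", "kyu:キュ",
--     "kyo:キョ", "sha:シャ", "shu:シュ", "sho:ショ", "cha:チャ", "chu:チュ", "cho:チョ", "nya:ニャ", "nyu:ニュ", "nyo:ニョ",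
--     "hya:ヒャ", "hyu:ヒュ", "hyo:ヒョ", "mya:ミャ", "myu:ミュ", "myo:ミョ", "rya:リャ", "ryu:リュ", "ryo:リョ", "gya:ギャ",
--     "gyu:ギュ", "gyo:ギョ", "ja:ジャ", "ju:ジュ", "jo:ジョ", "bya:ビャ", "byu:ビュ", "byo:ビョ", "pya:ピャ", "pyu:ピュ",
--     "pyo:ピョ",
-- ]
--
-- _KANA = dict(e.split(":") for e in _ENTRIES)
-- _KEYS = sorted(_KANA, key=len, reverse=True)
--
-- # alternation keys grouped by first letter (longest-first order kept per group)
-- _BY_FIRST = {}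
-- for _k in _KEYS:
--     _BY_FIRST.setdefault(_k[0], []).append(_k)
--
--
-- def _fullwidth(ch):
--     c = ch.upper()
--     cp = ord(c)
--     return chr(cp + _HW_TO_FW_OFFSET) if 0x21 <= cp <= 0x7E else c
--
--
-- def romaji_to_katakana(text: str) -> str:
--     s = text.lower()
--     out = []
--     i, n = 0, len(s)
--     while i < n:
--         ch = s[i]
--         for k in _BY_FIRST.get(ch, []):
--             if s.startswith(k, i):
--                 out.append(_KANA[k])
--                 i += len(k)
--                 break
--         else:
--             out.append("・" if ch == " " else "ー" if ch == "-" else _fullwidth(ch))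
--             i += 1
--     return "".join(out)
-- ===== Notes on version B (the rewrite author's own statement) =====
-- stated objective: alternative
-- what changed: A tries the 3-, 2- and 1-char slice at each position against a dict literal; B keeps the table as compact key:kana entry strings parsed once, sorts the keys longest-first into per-first-letter alternation lists, and at each position takes the first matching key of the current letter's list (regex-alternation style) with a single fallback branch.
import Mathlib
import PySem

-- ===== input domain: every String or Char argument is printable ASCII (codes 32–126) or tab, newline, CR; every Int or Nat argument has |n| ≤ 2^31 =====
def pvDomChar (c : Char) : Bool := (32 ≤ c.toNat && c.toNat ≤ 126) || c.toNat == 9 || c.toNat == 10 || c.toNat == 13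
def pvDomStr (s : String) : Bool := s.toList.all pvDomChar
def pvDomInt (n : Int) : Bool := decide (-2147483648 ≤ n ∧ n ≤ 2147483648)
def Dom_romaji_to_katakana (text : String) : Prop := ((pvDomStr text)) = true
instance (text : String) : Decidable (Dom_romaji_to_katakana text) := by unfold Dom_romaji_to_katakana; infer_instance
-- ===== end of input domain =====

-- B keeps the table in compact "key:kana" entry strings parsed once, sorts the keys
-- longest-first, and at each position takes the first match from that alternation
-- list instead of A's 3/2/1-char slice-and-dict lookups; same return value.

-- ===== PORT A =====
-- A's _MAP, keys as List Char, in dict insertion order.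
def kanaPairs : List (List Char × String) := [
  (['a'], "ア"), (['i'], "イ"), (['u'], "ウ"), (['e'], "エ"), (['o'], "オ"),
  (['k', 'a'], "カ"), (['k', 'i'], "キ"), (['k', 'u'], "ク"), (['k', 'e'], "ケ"), (['k', 'o'], "コ"),
  (['s', 'a'], "サ"), (['s', 'h', 'i'], "シ"), (['s', 'i'], "シ"), (['s', 'u'], "ス"), (['s', 'e'], "セ"), (['s', 'o'], "ソ"),
  (['t', 'a'], "タ"), (['c', 'h', 'i'], "チ"), (['t', 'i'], "チ"), (['t', 's', 'u'], "ツ"), (['t', 'u'], "ツ"), (['t', 'e'], "テ"), (['t', 'o'], "ト"),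
  (['n', 'a'], "ナ"), (['n', 'i'], "ニ"), (['n', 'u'], "ヌ"), (['n', 'e'], "ネ"), (['n', 'o'], "ノ"),
  (['h', 'a'], "ハ"), (['h', 'i'], "ヒ"), (['f', 'u'], "フ"), (['h', 'u'], "フ"), (['h', 'e'], "ヘ"), (['h', 'o'], "ホ"),
  (['m', 'a'], "マ"), (['m', 'i'], "ミ"), (['m', 'u'], "ム"), (['m', 'e'], "メ"), (['m', 'o'], "モ"),
  (['y', 'a'], "ヤ"), (['y', 'u'], "ユ"), (['y', 'o'], "ヨ"),
  (['r', 'a'], "ラ"), (['r', 'i'], "リ"), (['r', 'u'], "ル"), (['r', 'e'], "レ"), (['r', 'o'], "ロ"),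
  (['w', 'a'], "ワ"), (['w', 'i'], "ヰ"), (['w', 'e'], "ヱ"), (['w', 'o'], "ヲ"),
  (['n'], "ン"),
  (['g', 'a'], "ガ"), (['g', 'i'], "ギ"), (['g', 'u'], "グ"), (['g', 'e'], "ゲ"), (['g', 'o'], "ゴ"),
  (['z', 'a'], "ザ"), (['j', 'i'], "ジ"), (['z', 'i'], "ジ"), (['z', 'u'], "ズ"), (['z', 'e'], "ゼ"), (['z', 'o'], "ゾ"),
  (['d', 'a'], "ダ"), (['d', 'i'], "ヂ"), (['d', 'u'], "ヅ"), (['d', 'e'], "デ"), (['d', 'o'], "ド"),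
  (['b', 'a'], "バ"), (['b', 'i'], "ビ"), (['b', 'u'], "ブ"), (['b', 'e'], "ベ"), (['b', 'o'], "ボ"),
  (['p', 'a'], "パ"), (['p', 'i'], "ピ"), (['p', 'u'], "プ"), (['p', 'e'], "ペ"), (['p', 'o'], "ポ"),
  (['k', 'y', 'a'], "キャ"), (['k', 'y', 'u'], "キュ"), (['k', 'y', 'o'], "キョ"),
  (['s', 'h', 'a'], "シャ"), (['s', 'h', 'u'], "シュ"), (['s', 'h', 'o'], "ショ"),
  (['c', 'h', 'a'], "チャ"), (['c', 'h', 'u'], "チュ"), (['c', 'h', 'o'], "チョ"),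
  (['n', 'y', 'a'], "ニャ"), (['n', 'y', 'u'], "ニュ"), (['n', 'y', 'o'], "ニョ"),
  (['h', 'y', 'a'], "ヒャ"), (['h', 'y', 'u'], "ヒュ"), (['h', 'y', 'o'], "ヒョ"),
  (['m', 'y', 'a'], "ミャ"), (['m', 'y', 'u'], "ミュ"), (['m', 'y', 'o'], "ミョ"),
  (['r', 'y', 'a'], "リャ"), (['r', 'y', 'u'], "リュ"), (['r', 'y', 'o'], "リョ"),
  (['g', 'y', 'a'], "ギャ"), (['g', 'y', 'u'], "ギュ"), (['g', 'y', 'o'], "ギョ"),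
  (['j', 'a'], "ジャ"), (['j', 'u'], "ジュ"), (['j', 'o'], "ジョ"),
  (['b', 'y', 'a'], "ビャ"), (['b', 'y', 'u'], "ビュ"), (['b', 'y', 'o'], "ビョ"),
  (['p', 'y', 'a'], "ピャ"), (['p', 'y', 'u'], "ピュ"), (['p', 'y', 'o'], "ピョ")
]

def kanaMap : PySem.Dict (List Char) String := PySem.Dict.ofList kanaPairs

-- helper ascii_to_fullwidth, transliterated (result list of 1-char strings, then "".join)
def ascii_to_fullwidth (text : String) : String :=
  PySem.Str.join "" (text.toList.foldl (fun result ch =>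
    let cp := ch.toNat
    if 0x21 ≤ cp ∧ cp ≤ 0x7E then result ++ [String.ofList [Char.ofNat (cp + 0xFEE0)]]
    else if ch = ' ' then result ++ ["\u3000"]
    else result ++ [String.ofList [ch]]) [])

-- the while-loop of A; chunk text_lower[i:i+n] is the clamped (cs.drop i).take n
set_option maxRecDepth 10000 in
def aLoop (cs : List Char) (i : Nat) (result : List String) : List String :=
  if h : i < cs.length then
    match kanaMap.get? ((cs.drop i).take 3) with
    | some v => aLoop cs (i + 3) (result ++ [v])
    | none =>
      match kanaMap.get? ((cs.drop i).take 2) with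
      | some v => aLoop cs (i + 2) (result ++ [v])
      | none =>
        match kanaMap.get? ((cs.drop i).take 1) with
        | some v => aLoop cs (i + 1) (result ++ [v])
        | none =>
          let ch := cs[i]
          let piece := if ch = ' ' then "・" else if ch = '-' then "ー"
                       else ascii_to_fullwidth (String.ofList (PySem.Chars.upper [ch]))
          aLoop cs (i + 1) (result ++ [piece])
  else result
termination_by cs.length - i
decreasing_by all_goals omega

def romaji_to_katakana (text : String) : String :=
  PySem.Str.join "" (aLoop (PySem.Chars.lower text.toList) 0 [])

-- ===== PORT B =====
-- _ENTRIES: the table kept as compact "key:kana" entry strings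
def bEntries : List String := ["a:ア", "i:イ", "u:ウ", "e:エ", "o:オ", "ka:カ", "ki:キ", "ku:ク", "ke:ケ", "ko:コ", "sa:サ", "shi:シ", "si:シ", "su:ス", "se:セ", "so:ソ", "ta:タ", "chi:チ", "ti:チ", "tsu:ツ", "tu:ツ", "te:テ", "to:ト", "na:ナ", "ni:ニ", "nu:ヌ", "ne:ネ", "no:ノ", "ha:ハ", "hi:ヒ", "fu:フ", "hu:フ", "he:ヘ", "ho:ホ", "ma:マ", "mi:ミ", "mu:ム", "me:メ", "mo:モ", "ya:ヤ", "yu:ユ", "yo:ヨ", "ra:ラ", "ri:リ", "ru:ル", "re:レ", "ro:ロ", "wa:ワ", "wi:ヰ", "we:ヱ", "wo:ヲ", "n:ン", "ga:ガ", "gi:ギ", "gu:グ", "ge:ゲ", "go:ゴ", "za:ザ", "ji:ジ", "zi:ジ", "zu:ズ", "ze:ゼ", "zo:ゾ", "da:ダ", "di:ヂ", "du:ヅ", "de:デ", "do:ド", "ba:バ", "bi:ビ", "bu:ブ", "be:ベ", "bo:ボ", "pa:パ", "pi:ピ", "pu:プ", "pe:ペ", "po:ポ", "kya:キャ", "kyu:キュ",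 "kyo:キョ", "sha:シャ", "shu:シュ", "sho:ショ", "cha:チャ", "chu:チュ", "cho:チョ", "nya:ニャ", "nyu:ニュ", "nyo:ニョ", "hya:ヒャ", "hyu:ヒュ", "hyo:ヒョ", "mya:ミャ", "myu:ミュ", "myo:ミョ", "rya:リャ", "ryu:リュ", "ryo:リョ", "gya:ギャ", "gyu:ギュ", "gyo:ギョ", "ja:ジャ", "ju:ジュ", "jo:ジョ", "bya:ビャ", "byu:ビュ", "byo:ビョ", "pya:ピャ", "pyu:ピュ", "pyo:ピョ"]

-- _KANA = dict(e.split(":") for e in _ENTRIES)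
def bPairs : List (List Char × String) :=
  bEntries.map (fun e =>
    let parts := PySem.Chars.splitOn e.toList [':']
    (parts.getD 0 [], String.ofList (parts.getD 1 [])))

def bMap : PySem.Dict (List Char) String := PySem.Dict.ofList bPairs

-- _KEYS = sorted(_KANA, key=len, reverse=True)
def bKeys : List (List Char) := PySem.List.sorted bMap.keys (fun k => k.length) true

-- termination fact for bLoop (every alternation key is nonempty)
set_option maxRecDepth 1000000 in
set_option maxHeartbeats 2000000 in
theorem bKeys_pos : ∀ k ∈ bKeys, 0 < k.length := by decide

-- _fullwidth(ch)
def bFullwidth (ch : Char) : String :=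
  let c := PySem.Chars.upperChar ch
  if 0x21 ≤ c.toNat ∧ c.toNat ≤ 0x7E then String.ofList [Char.ofNat (c.toNat + 0xFEE0)]
  else String.ofList [c]

-- _BY_FIRST: setdefault(k[0], []).append(k) is d.modify k[0] [] (· ++ [k]); k[0] is pyGetD k 0 ' '
def bIndex : PySem.Dict Char (List (List Char)) :=
  bKeys.foldl (fun d k => d.modify (PySem.List.pyGetD k 0 ' ') [] (· ++ [k])) PySem.Dict.empty

-- the three bIndex facts below are cited by bLoop's termination proof
theorem bIndex_eq : bIndex =
    (bKeys.map (fun k => (PySem.List.pyGetD k 0 ' ', k))).foldl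
      (fun d p => d.modify p.1 [] (· ++ [p.2])) PySem.Dict.empty := by
  rw [List.foldl_map]
  rfl

theorem bIndex_getD (c : Char) :
    bIndex.getD c [] = bKeys.filter (fun k => PySem.List.pyGetD k 0 ' ' == c) := by
  rw [bIndex_eq, PySem.Dict.getD_foldl_modify_append, PySem.Dict.getD_empty,
    List.nil_append, List.filter_map, List.map_map]
  simp [Function.comp_def]

set_option maxRecDepth 1000000 in
set_option maxHeartbeats 2000000 in
theorem bIndex_pos : ∀ (c : Char), ∀ k ∈ bIndex.getD c [], 0 < k.length := by
  intro c k hk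
  rw [bIndex_getD] at hk
  exact bKeys_pos k (List.mem_of_mem_filter hk)

-- the while-loop of B: ch = s[i]; first match among the keys starting with ch
set_option maxRecDepth 100000 in
def bLoop (cs : List Char) (i : Nat) (out : List String) : List String :=
  if h : i < cs.length then
    match hk : (bIndex.getD cs[i] []).find? (fun k => k.isPrefixOf (cs.drop i)) with
    | some k => bLoop cs (i + k.length) (out ++ [bMap.getD k ""])
    | none =>
      let ch := cs[i]
      bLoop cs (i + 1)
        (out ++ [if ch = ' ' then "・" else if ch = '-' then "ー" else bFullwidth ch])
  else out
termination_by cs.length - i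
decreasing_by
  · have := bIndex_pos cs[i] k (List.mem_of_find?_eq_some hk)
    omega
  · omega

def romaji_to_katakana_alt (text : String) : String :=
  PySem.Str.join "" (bLoop (PySem.Chars.lower text.toList) 0 [])

-- ===== PRECONDITION & SPEC =====
def Spec_romaji_to_katakana (text : String) (out : String) : Prop := out = romaji_to_katakana_alt text
instance (text : String) (out : String) : Decidable (Spec_romaji_to_katakana text out) := by unfold Spec_romaji_to_katakana; infer_instance

-- ===== CLAIM (what is proved, stated in full; the proofs are below) =====
def Claim_equal_romaji_to_katakana : Prop := ∀ (text : String), Dom_romaji_to_katakana text → Spec_romaji_to_katakana text (romaji_to_katakana text)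

-- ===== LEMMAS AND PROOFS =====

-- B's parsed table is exactly A's table (same pairs, same order)
set_option maxRecDepth 1000000 in
set_option maxHeartbeats 2000000 in
theorem hPairs : bPairs = kanaPairs := by decide

theorem hMap : bMap = kanaMap := by unfold bMap kanaMap; rw [hPairs]

-- the key list of the table
def KS : List (List Char) := kanaPairs.map (fun p => p.1)

set_option maxRecDepth 100000 in
theorem hKeysEq : kanaMap.keys = KS := by decide

set_option maxRecDepth 1000000 in
set_option maxHeartbeats 2000000 in
theorem hBKeys : bKeys =
    KS.filter (fun k => k.length == 3) ++ KS.filter (fun k => k.length == 2) ++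
      KS.filter (fun k => k.length == 1) := by decide

theorem get?_none_iff (c : List Char) : kanaMap.get? c = none ↔ c ∉ KS := by
  rw [PySem.Dict.get?_eq_none_iff_not_mem_keys, hKeysEq]

theorem mem_of_get?_some {c : List Char} {v : String} (h : kanaMap.get? c = some v) : c ∈ KS := by
  by_contra hc
  rw [← get?_none_iff] at hc
  simp [h] at hc

-- find? over keys of one fixed length n is just the lookup of s.take n
theorem find?_prefix_of_fixed_len (l : List (List Char)) (s : List Char) (n : Nat)
    (hl : ∀ k ∈ l, k.length = n) :
    l.find? (fun k => k.isPrefixOf s) = if s.take n ∈ l then some (s.take n) else none := by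
  induction l with
  | nil => simp
  | cons k t ih =>
    have hk := hl k List.mem_cons_self
    by_cases hpre : k.isPrefixOf s = true
    · have hkeq : k = s.take n := by
        have h2 := List.prefix_iff_eq_take.mp (List.isPrefixOf_iff_prefix.mp hpre)
        rw [hk] at h2; exact h2
      subst hkeq
      simp [hpre]
    · have hne : s.take n ≠ k := by
        intro e
        exact hpre (List.isPrefixOf_iff_prefix.mpr (e ▸ List.take_prefix n s))
      simp only [List.find?_cons, hpre, ih (fun x hx => hl x (List.mem_cons_of_mem _ hx))]
      simp [List.mem_cons, hne]

theorem find?_prefix_none_of_long (l : List (List Char)) (s : List Char)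
    (hl : ∀ k ∈ l, s.length < k.length) :
    l.find? (fun k => k.isPrefixOf s) = none := by
  rw [List.find?_eq_none]
  intro k hk hp
  have h1 := (List.isPrefixOf_iff_prefix.mp hp).length_le
  have h2 := hl k hk
  omega

def F (n : Nat) (s : List Char) : Option (List Char) :=
  if n ≤ s.length ∧ s.take n ∈ KS then some (s.take n) else none

theorem seg_eq (n : Nat) (s : List Char) :
    (KS.filter (fun k => k.length == n)).find? (fun k => k.isPrefixOf s) = F n s := by
  by_cases hn : n ≤ s.length
  · rw [find?_prefix_of_fixed_len _ s n (by intro k hk; simpa using (List.mem_filter.mp hk).2)]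
    have hlen : (s.take n).length = n := by simp [List.length_take]; omega
    by_cases hm : s.take n ∈ KS
    · simp [F, hn, hm, List.mem_filter, hlen]
    · simp [F, hn, hm, List.mem_filter]
  · rw [find?_prefix_none_of_long _ _ (by
      intro k hk
      have := (List.mem_filter.mp hk).2
      simp at this
      omega)]
    simp [F, hn]

theorem bfind_eq (s : List Char) :
    bKeys.find? (fun k => k.isPrefixOf s) = (F 3 s).or ((F 2 s).or (F 1 s)) := by
  rw [hBKeys, List.find?_append, List.find?_append, seg_eq, seg_eq, seg_eq, Option.or_assoc]

theorem find?_filter_of_imp {α : Type} (l : List α) (p q : α → Bool)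
    (h : ∀ k ∈ l, p k = true → q k = true) :
    (l.filter q).find? p = l.find? p := by
  induction l with
  | nil => rfl
  | cons k t ih =>
    have ih' := ih (fun x hx => h x (List.mem_cons_of_mem _ hx))
    by_cases hq : q k = true
    · rw [List.filter_cons_of_pos hq]
      rw [List.find?_cons, List.find?_cons]
      cases hp : p k
      · exact ih'
      · rfl
    · have hp : p k = false := by
        cases hpk : p k
        · rfl
        · exact absurd (h k List.mem_cons_self hpk) hq
      rw [List.filter_cons_of_neg (by simp [hq]), List.find?_cons, hp]
      exact ih'

theorem bfind_group (c : Char) (rest : List Char) :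
    (bIndex.getD c []).find? (fun k => k.isPrefixOf (c :: rest)) =
    bKeys.find? (fun k => k.isPrefixOf (c :: rest)) := by
  rw [bIndex_getD]
  apply find?_filter_of_imp
  intro k hk hp
  have hpos := bKeys_pos k hk
  cases k with
  | nil => simp at hpos
  | cons a t =>
    have h1 : a = c := (List.cons_prefix_cons.mp (List.isPrefixOf_iff_prefix.mp hp)).1
    subst h1
    simp [PySem.List.pyGetD_zero_cons]

theorem upperChar_ne_space {ch : Char} (h : ch ≠ ' ') : PySem.Chars.upperChar ch ≠ ' ' := by
  unfold PySem.Chars.upperChar PySem.Chars.islower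
  split_ifs with hc
  · intro e
    simp [Char.le_def] at hc
    have h97 : 97 ≤ ch.toNat ∧ ch.toNat ≤ 122 := hc
    have hval : (Char.ofNat (ch.toNat - 32)).toNat = ch.toNat - 32 := by
      rw [Char.toNat_ofNat, if_pos (Or.inl (by omega))]
    rw [e] at hval
    have h32 : (' ' : Char).toNat = 32 := rfl
    omega
  · exact h

theorem fallback_eq (ch : Char) (h : ch ≠ ' ') :
    ascii_to_fullwidth (String.ofList (PySem.Chars.upper [ch])) = bFullwidth ch := by
  unfold ascii_to_fullwidth bFullwidth
  simp only [PySem.Chars.upper, List.map, String.toList_ofList, List.foldl, List.nil_append]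
  have hcs : PySem.Chars.upperChar ch ≠ ' ' := upperChar_ne_space h
  split_ifs with h1
  · simp [PySem.Str.join, PySem.Chars.join, List.intercalate]
  · simp [PySem.Str.join, PySem.Chars.join, List.intercalate]

set_option maxRecDepth 100000 in
set_option maxHeartbeats 2000000 in
theorem loop_eq (m : Nat) : ∀ (cs : List Char) (i : Nat) (out : List String),
    cs.length - i ≤ m → aLoop cs i out = bLoop cs i out := by
  induction m with
  | zero =>
    intro cs i out hm
    have h : ¬ i < cs.length := by omega
    unfold aLoop bLoop
    simp [h]
  | succ m ih =>
    intro cs i out hm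
    by_cases h : i < cs.length
    case neg => unfold aLoop bLoop; simp [h]
    case pos =>
    have hslen : (cs.drop i).length = cs.length - i := List.length_drop
    have hbf := bfind_eq (cs.drop i)
    have hcons : cs.drop i = cs[i] :: cs.drop (i + 1) := List.drop_eq_getElem_cons h
    have hgrp : (bIndex.getD cs[i] []).find? (fun k => k.isPrefixOf (cs.drop i)) =
        bKeys.find? (fun k => k.isPrefixOf (cs.drop i)) := by
      rw [hcons]; exact bfind_group cs[i] (cs.drop (i + 1))
    have hterma : ∀ j (out' : List String), cs.length ≤ j → aLoop cs j out' = out' := by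
      intro j out' hj
      unfold aLoop
      simp [show ¬ j < cs.length by omega]
    have htermb : ∀ j (out' : List String), cs.length ≤ j → bLoop cs j out' = out' := by
      intro j out' hj
      unfold bLoop
      simp [show ¬ j < cs.length by omega]
    unfold aLoop bLoop
    rw [dif_pos h, dif_pos h]
    split
    next v hg3 =>
      -- A matched the 3-char chunk
      have hmem := mem_of_get?_some hg3
      have hgd : bMap.getD ((cs.drop i).take 3) "" = v := by
        rw [hMap]; exact PySem.Dict.getD_of_get?_eq_some kanaMap "" hg3
      by_cases h3 : 3 ≤ (cs.drop i).length
      · have hfind : bKeys.find? (fun k => k.isPrefixOf (cs.drop i)) = some ((cs.drop i).take 3) := by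
          rw [hbf, show F 3 (cs.drop i) = some ((cs.drop i).take 3) by
            unfold F; rw [if_pos ⟨h3, hmem⟩], Option.some_or]
        split
        next k hk =>
          rw [hgrp, hfind] at hk
          injection hk with hk
          subst hk
          rw [hgd]
          have hlen : ((cs.drop i).take 3).length = 3 := by simp; omega
          rw [hlen]
          exact ih cs (i + 3) _ (by omega)
        next hk => rw [hgrp, hfind] at hk; cases hk
      · -- the chunk was truncated: it is the whole remaining text (1 or 2 chars)
        have hs3 : (cs.drop i).take 3 = cs.drop i := List.take_of_length_le (by omega)
        have hF3 : F 3 (cs.drop i) = none := by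
          unfold F; rw [if_neg (fun hc => absurd hc.1 (by omega))]
        by_cases h2 : 2 ≤ (cs.drop i).length
        · have hs2 : (cs.drop i).take 2 = cs.drop i := List.take_of_length_le (by omega)
          have hfind : bKeys.find? (fun k => k.isPrefixOf (cs.drop i)) = some ((cs.drop i).take 2) := by
            rw [hbf, hF3, Option.none_or, show F 2 (cs.drop i) = some ((cs.drop i).take 2) by
              unfold F; rw [if_pos ⟨h2, by rw [hs2, ← hs3]; exact hmem⟩], Option.some_or]
          split
          next k hk =>
            rw [hgrp, hfind] at hk
            injection hk with hk
            subst hk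
            have hgd2 : bMap.getD ((cs.drop i).take 2) "" = v := by
              rw [hs2, ← hs3]; exact hgd
            rw [hgd2]
            have hlen : ((cs.drop i).take 2).length = 2 := by simp; omega
            rw [hlen, hterma _ _ (by omega), htermb _ _ (by omega)]
          next hk => rw [hgrp, hfind] at hk; cases hk
        · have h1 : 1 ≤ (cs.drop i).length := by omega
          have hs1 : (cs.drop i).take 1 = cs.drop i := List.take_of_length_le (by omega)
          have hF2 : F 2 (cs.drop i) = none := by
            unfold F; rw [if_neg (fun hc => absurd hc.1 (by omega))]
          have hfind : bKeys.find? (fun k => k.isPrefixOf (cs.drop i)) = some ((cs.drop i).take 1) := by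
            rw [hbf, hF3, hF2, Option.none_or, Option.none_or, show F 1 (cs.drop i) = some ((cs.drop i).take 1) by
              unfold F; rw [if_pos ⟨h1, by rw [hs1, ← hs3]; exact hmem⟩]]
          split
          next k hk =>
            rw [hgrp, hfind] at hk
            injection hk with hk
            subst hk
            have hgd1 : bMap.getD ((cs.drop i).take 1) "" = v := by
              rw [hs1, ← hs3]; exact hgd
            rw [hgd1]
            have hlen : ((cs.drop i).take 1).length = 1 := by simp; omega
            rw [hlen, hterma _ _ (by omega), htermb _ _ (by omega)]
          next hk => rw [hgrp, hfind] at hk; cases hk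
    next hg3 =>
      have hn3 : (cs.drop i).take 3 ∉ KS := (get?_none_iff _).mp hg3
      have hF3 : F 3 (cs.drop i) = none := by
        unfold F; rw [if_neg (fun hc => absurd hc.2 hn3)]
      split
      next v hg2 =>
        -- A matched the 2-char chunk
        have hmem2 := mem_of_get?_some hg2
        have hgd2 : bMap.getD ((cs.drop i).take 2) "" = v := by
          rw [hMap]; exact PySem.Dict.getD_of_get?_eq_some kanaMap "" hg2
        by_cases h2 : 2 ≤ (cs.drop i).length
        · have hfind : bKeys.find? (fun k => k.isPrefixOf (cs.drop i)) = some ((cs.drop i).take 2) := by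
            rw [hbf, hF3, Option.none_or, show F 2 (cs.drop i) = some ((cs.drop i).take 2) by
              unfold F; rw [if_pos ⟨h2, hmem2⟩], Option.some_or]
          split
          next k hk =>
            rw [hgrp, hfind] at hk
            injection hk with hk
            subst hk
            rw [hgd2]
            have hlen : ((cs.drop i).take 2).length = 2 := by simp; omega
            rw [hlen]
            exact ih cs (i + 2) _ (by omega)
          next hk => rw [hgrp, hfind] at hk; cases hk
        · exfalso
          have hs2 : (cs.drop i).take 2 = cs.drop i := List.take_of_length_le (by omega)
          have hs3 : (cs.drop i).take 3 = cs.drop i := List.take_of_length_le (by omega)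
          rw [hs2, ← hs3] at hmem2
          exact hn3 hmem2
      next hg2 =>
        have hn2 : (cs.drop i).take 2 ∉ KS := (get?_none_iff _).mp hg2
        have hF2 : F 2 (cs.drop i) = none := by
          unfold F; rw [if_neg (fun hc => absurd hc.2 hn2)]
        split
        next v hg1 =>
          -- A matched the 1-char chunk
          have hmem1 := mem_of_get?_some hg1
          have hgd1 : bMap.getD ((cs.drop i).take 1) "" = v := by
            rw [hMap]; exact PySem.Dict.getD_of_get?_eq_some kanaMap "" hg1
          have h1 : 1 ≤ (cs.drop i).length := by omega
          have hfind : bKeys.find? (fun k => k.isPrefixOf (cs.drop i)) = some ((cs.drop i).take 1) := by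
            rw [hbf, hF3, hF2, Option.none_or, Option.none_or, show F 1 (cs.drop i) = some ((cs.drop i).take 1) by
              unfold F; rw [if_pos ⟨h1, hmem1⟩]]
          split
          next k hk =>
            rw [hgrp, hfind] at hk
            injection hk with hk
            subst hk
            rw [hgd1]
            have hlen : ((cs.drop i).take 1).length = 1 := by simp; omega
            rw [hlen]
            exact ih cs (i + 1) _ (by omega)
          next hk => rw [hgrp, hfind] at hk; cases hk
        next hg1 =>
          -- no chunk matched: both sides take the fallback branch
          have hn1 : (cs.drop i).take 1 ∉ KS := (get?_none_iff _).mp hg1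
          have hfind : bKeys.find? (fun k => k.isPrefixOf (cs.drop i)) = none := by
            rw [hbf, hF3, hF2, Option.none_or, Option.none_or, show F 1 (cs.drop i) = none by
              unfold F; rw [if_neg (fun hc => absurd hc.2 hn1)]]
          split
          next k hk => rw [hgrp, hfind] at hk; cases hk
          next hk =>
            have hpiece : (if cs[i] = ' ' then "・" else if cs[i] = '-' then "ー"
                else ascii_to_fullwidth (String.ofList (PySem.Chars.upper [cs[i]]))) =
                (if cs[i] = ' ' then "・" else if cs[i] = '-' then "ー" else bFullwidth cs[i]) := by
              by_cases hsp : cs[i] = ' '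
              · simp [hsp]
              · simp [hsp, fallback_eq _ hsp]
            simp only []
            rw [hpiece]
            exact ih cs (i + 1) _ (by omega)

-- ===== VERDICT (by name: the statement is the Claim_ definition above) =====
theorem romaji_to_katakana_spec : Claim_equal_romaji_to_katakana := by
  intro text _
  unfold Spec_romaji_to_katakana romaji_to_katakana romaji_to_katakana_alt
  rw [loop_eq (PySem.Chars.lower text.toList).length _ _ _ (by omega)]
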